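-- pv_equiv track=rewrite | github.com/csorianoai/nadakki-ai-suite | routers/agent_execution_router.py | _resolve_agent_id
-- ===== SOURCE A (Python) =====
-- from typing import Any, Dict, List, Optional
--
-- def _is_backup_agent(agent_id: str) -> bool:
--     """Check if an agent ID corresponds to a backup agent."""
--     return "_backup_" in agent_id
--
-- def _resolve_agent_id(agent_id: str, agents: Dict[str, dict]) -> Optional[dict]:
--     """
--     Resolve an agent by ID with flexible matching:
--     - If agent_id contains '__': exact match (long ID format)
--     - If agent_id is short: find agent whose long ID ends with '__<short_id>'
--     Backup agents are excluded from matching.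
--     """
--     # Long ID: exact match
--     if "__" in agent_id:
--         agent = agents.get(agent_id)
--         if agent and not _is_backup_agent(agent_id):
--             return agent
--         return None
--
--     # Short ID: find match where long ID ends with __<short_id>
--     suffix = f"__{agent_id}"
--     candidates = []
--     for aid, agent in agents.items():
--         if _is_backup_agent(aid):
--             continue
--         if aid.endswith(suffix):
--             candidates.append(agent)
--
--     if len(candidates) == 1:
--         return candidates[0]
--     if len(candidates) > 1:
--         # Return first non-backup production agent, or just first
--         for c in candidates:
--             if c.get("status") == "production":
--                 return c
--         return candidates[0]
--     return None
-- ===== SOURCE B (Python) =====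
-- def _is_backup_agent(agent_id: str) -> bool:
--     return "_backup_" in agent_id
--
-- def _resolve_agent_id(agent_id, agents):
--     # Long ID: exact match (unchanged)
--     if "__" in agent_id:
--         agent = agents.get(agent_id)
--         if agent and not _is_backup_agent(agent_id):
--             return agent
--         return None
--
--     # Short ID: one fused pass, no candidates list and no second scan
--     suffix = "__" + agent_id
--     count = 0
--     first_candidate = None
--     first_production = None
--     for aid, agent in agents.items():
--         if _is_backup_agent(aid) or not aid.endswith(suffix):
--             continue
--         count += 1
--         if first_candidate is None:
--             first_candidate = agent
--         if first_production is None and agent.get("status") == "production":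
--             first_production = agent
--
--     if count == 0:
--         return None
--     if count == 1:
--         return first_candidate
--     return first_production if first_production is not None else first_candidate
-- ===== Notes on version B (the rewrite author's own statement) =====
-- stated objective: alternative
-- what changed: Replaces A's two-phase short-ID resolution (build a candidates list, then rescan it for a production agent) with a single fused pass that maintains a match count, the first match and the first production match, deciding the result from those three values.
import Mathlib
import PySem

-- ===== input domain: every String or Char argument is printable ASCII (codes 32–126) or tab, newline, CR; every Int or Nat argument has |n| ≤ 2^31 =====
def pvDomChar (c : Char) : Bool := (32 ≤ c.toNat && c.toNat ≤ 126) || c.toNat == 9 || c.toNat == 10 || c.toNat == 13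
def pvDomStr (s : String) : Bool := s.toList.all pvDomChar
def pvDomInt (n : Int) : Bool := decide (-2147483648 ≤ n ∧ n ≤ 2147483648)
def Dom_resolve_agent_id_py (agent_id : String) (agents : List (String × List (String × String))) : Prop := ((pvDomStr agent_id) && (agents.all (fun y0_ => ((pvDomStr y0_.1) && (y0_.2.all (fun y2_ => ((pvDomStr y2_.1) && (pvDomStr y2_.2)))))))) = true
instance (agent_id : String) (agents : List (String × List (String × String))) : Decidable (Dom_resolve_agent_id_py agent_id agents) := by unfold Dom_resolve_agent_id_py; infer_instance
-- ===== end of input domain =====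

-- B is an alternative decomposition of the short-ID branch: one fused pass with
-- count / first match / first production match instead of A's candidates list plus rescan.
-- dicts are association lists (first-match lookup, insertion-order iteration).

-- ===== PORT A =====
-- "_backup_" in agent_id
def pvIsBackup (aid : String) : Bool := PySem.Str.isIn "_backup_" aid

-- d.get(k)  (first-match association-list lookup)
def pvDGet (d : List (String × String)) (k : String) : Option String :=
  (d.find? (fun q => q.1 == k)).map (·.2)

-- c.get("status") == "production"
def pvIsProd (c : List (String × String)) : Bool := pvDGet c "status" == some "production"

-- A's second loop: 'for c in candidates: if c.get("status") == "production": return c'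
def pvScanProd : List (List (String × String)) → Option (List (String × String))
  | [] => none
  | c :: rest => if pvIsProd c then some c else pvScanProd rest

def resolve_agent_id_py (agent_id : String) (agents : List (String × List (String × String))) : Option (List (String × String)) :=
  if PySem.Str.isIn "__" agent_id then
    match (agents.find? (fun p => p.1 == agent_id)).map (·.2) with
    | some agent => if agent ≠ [] ∧ pvIsBackup agent_id = false then some agent else none
    | none => none
  else
    -- suffix = "__" + agent_id, kept as a char list (exact for endswith)
    let sfx : List Char := '_' :: '_' :: agent_id.toList
    let candidates : List (List (String × String)) :=
      agents.foldl (fun acc p =>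
        if pvIsBackup p.1 then acc
        else if PySem.Chars.endswith p.1.toList sfx then acc ++ [p.2]
        else acc) []
    if candidates.length == 1 then candidates.head?
    else if candidates.length > 1 then
      match pvScanProd candidates with
      | some c => some c
      | none => candidates.head?
    else none

-- ===== PORT B =====
-- one fused pass: state = (count, first_candidate, first_production)
def pvBStep (sfx : List Char)
    (st : Nat × Option (List (String × String)) × Option (List (String × String)))
    (p : String × List (String × String)) :
    Nat × Option (List (String × String)) × Option (List (String × String)) :=
  if pvIsBackup p.1 || !PySem.Chars.endswith p.1.toList sfx then st
  else
    (st.1 + 1,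
     (match st.2.1 with | none => some p.2 | some c => some c),
     (match st.2.2 with
      | none => if pvIsProd p.2 then some p.2 else none
      | some c => some c))

def resolve_agent_id_py_alt (agent_id : String) (agents : List (String × List (String × String))) : Option (List (String × String)) :=
  if PySem.Str.isIn "__" agent_id then
    match (agents.find? (fun p => p.1 == agent_id)).map (·.2) with
    | some agent => if agent ≠ [] ∧ pvIsBackup agent_id = false then some agent else none
    | none => none
  else
    let sfx : List Char := '_' :: '_' :: agent_id.toList
    let st := agents.foldl (pvBStep sfx) (0, none, none)
    if st.1 == 0 then none
    else if st.1 == 1 then st.2.1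
    else
      match st.2.2 with
      | some c => some c
      | none => st.2.1

-- ===== PRECONDITION & SPEC =====
def Spec_resolve_agent_id_py (agent_id : String) (agents : List (String × List (String × String))) (out : Option (List (String × String))) : Prop := out = resolve_agent_id_py_alt agent_id agents
instance (agent_id : String) (agents : List (String × List (String × String))) (out : Option (List (String × String))) : Decidable (Spec_resolve_agent_id_py agent_id agents out) := by unfold Spec_resolve_agent_id_py; infer_instance

-- ===== CLAIM (what is proved, stated in full; the proofs are below) =====
def Claim_equal_resolve_agent_id_py : Prop := ∀ (agent_id : String) (agents : List (String × List (String × String))), Dom_resolve_agent_id_py agent_id agents → Spec_resolve_agent_id_py agent_id agents (resolve_agent_id_py agent_id agents)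

-- ===== LEMMAS AND PROOFS =====

-- the shared keep-predicate of the short-ID branch
def pvKeep (sfx : List Char) (p : String × List (String × String)) : Bool :=
  !pvIsBackup p.1 && PySem.Chars.endswith p.1.toList sfx

-- A's fold builds exactly the filtered candidate list
theorem pvA_candidates (sfx : List Char) (agents : List (String × List (String × String)))
    (acc : List (List (String × String))) :
    agents.foldl (fun acc p =>
        if pvIsBackup p.1 then acc
        else if PySem.Chars.endswith p.1.toList sfx then acc ++ [p.2]
        else acc) acc
      = acc ++ ((agents.filter (pvKeep sfx)).map (·.2)) := by
  induction agents generalizing acc with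
  | nil => simp
  | cons p rest ih =>
    simp only [List.foldl_cons, List.filter_cons, pvKeep]
    by_cases hb : pvIsBackup p.1 <;> by_cases he : PySem.Chars.endswith p.1.toList sfx <;>
      simp [hb, he, ih]

-- pvScanProd is find? of pvIsProd
theorem pvScanProd_eq_find? (C : List (List (String × String))) :
    pvScanProd C = C.find? pvIsProd := by
  induction C with
  | nil => rfl
  | cons c rest ih =>
    simp only [pvScanProd, List.find?_cons, ih]
    by_cases h : pvIsProd c <;> simp [h]

-- B's fold state in closed form over the same filtered candidate list
theorem pvB_fold (sfx : List Char) (agents : List (String × List (String × String)))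
    (n : Nat) (fc fp : Option (List (String × String))) :
    agents.foldl (pvBStep sfx) (n, fc, fp)
      = (n + ((agents.filter (pvKeep sfx)).map (·.2)).length,
         fc.or ((agents.filter (pvKeep sfx)).map (·.2)).head?,
         fp.or (((agents.filter (pvKeep sfx)).map (·.2)).find? pvIsProd)) := by
  induction agents generalizing n fc fp with
  | nil => simp
  | cons p rest ih =>
    simp only [List.foldl_cons, List.filter_cons, pvKeep, pvBStep]
    by_cases hb : pvIsBackup p.1 <;> by_cases he : PySem.Chars.endswith p.1.toList sfx
    · simp only [hb, he]
      simp [ih, pvKeep]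
    · simp only [hb, he]
      simp [ih, pvKeep]
    · simp only [hb, he, Bool.not_true, Bool.false_or]
      rw [ih]
      cases fc <;> cases fp <;>
        simp [List.find?_cons, Nat.add_comm, Nat.add_left_comm] <;>
        by_cases hp : pvIsProd p.2 <;> simp [hp]
    · simp only [hb, he]
      simp [ih, pvKeep]

-- ===== VERDICT (by name: the statement is the Claim_ definition above) =====
theorem resolve_agent_id_py_spec : Claim_equal_resolve_agent_id_py := by
  intro agent_id agents _
  unfold Spec_resolve_agent_id_py resolve_agent_id_py resolve_agent_id_py_alt
  by_cases hlong : PySem.Str.isIn "__" agent_id = true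
  · rw [if_pos hlong, if_pos hlong]
  · rw [if_neg hlong, if_neg hlong]
    simp only [pvA_candidates, pvB_fold, List.nil_append, Option.none_or, Nat.zero_add]
    set C := ((agents.filter (pvKeep ('_' :: '_' :: agent_id.toList))).map (·.2)) with hC
    rw [pvScanProd_eq_find?]
    match C with
    | [] => simp
    | [c] => simp
    | c1 :: c2 :: rest =>
      simp only [List.length_cons, List.head?_cons]
      cases h : (c1 :: c2 :: rest).find? pvIsProd <;> simp
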